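-- pv_equiv track=rewrite | github.com/emmanueltab/dataAnalysisWithPython | celtic/parser/builder.py | build_doc_dictionary
-- ===== SOURCE A (Python) =====
-- def build_doc_dictionary(data):
--     temp_dictionary = {}
--     all_unique = {}  # dictionary
--     count_unique = 0 # value
--     temp_dictionary = {}
--
--     for document, word_list in data.items():
--         for word in word_list:
--             # creates all_values with key being document and value being amount of unique words in the document
--             if word_list.count(word) == 1:
--                 count_unique = count_unique + 1
--         all_unique[document] = count_unique # document //key && count_unique // value
--         count_unique = 0
--
--     temp_dictionary = all_unique
--     return temp_dictionary
-- ===== SOURCE B (Python) =====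
-- def build_doc_dictionary(data):
--     result = {}
--     for document, word_list in data.items():
--         s = sorted(word_list)
--         c = 0
--         runlen = 0
--         prev = None
--         for w in s:
--             if prev is None or w != prev:
--                 if runlen == 1:
--                     c += 1
--                 runlen = 1
--             else:
--                 runlen += 1
--             prev = w
--         if runlen == 1:
--             c += 1
--         result[document] = c
--     return result
-- ===== Notes on version B (the rewrite author's own statement) =====
-- stated objective: alternative
-- what changed: Replaces A's per-word word_list.count rescans with sorting each document's word list (sorted(), so the input is not mutated) and one adjacency pass that counts runs of length exactly 1.
import Mathlib
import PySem

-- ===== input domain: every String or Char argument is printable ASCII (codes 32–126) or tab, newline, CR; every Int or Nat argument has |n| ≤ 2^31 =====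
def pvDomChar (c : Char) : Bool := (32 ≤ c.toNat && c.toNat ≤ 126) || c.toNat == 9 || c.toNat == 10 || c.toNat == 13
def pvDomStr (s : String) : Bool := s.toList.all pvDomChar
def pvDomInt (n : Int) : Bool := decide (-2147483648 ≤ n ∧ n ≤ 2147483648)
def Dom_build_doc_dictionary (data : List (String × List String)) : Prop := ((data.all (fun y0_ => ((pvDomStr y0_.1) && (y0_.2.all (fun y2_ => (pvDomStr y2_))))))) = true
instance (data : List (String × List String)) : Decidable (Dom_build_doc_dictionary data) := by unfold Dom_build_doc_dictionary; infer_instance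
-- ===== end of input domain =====

-- B sorts each document's word list and counts runs of length 1 in one adjacency pass, replacing A's per-word word_list.count rescans; return-value equivalence (neither mutates its input).


-- ===== PORT A =====
-- A: per-word word_list.count rescans; running count_unique reset to 0 after each document.
def build_doc_dictionary (data : List (String × List String)) : List (String × Int) :=
  let st := data.foldl (fun (st : PySem.Dict String Int × Int) (p : String × List String) =>
      let cu := p.2.foldl (fun c w => if p.2.count w == 1 then c + 1 else c) st.2
      (st.1.insert p.1 cu, 0))
    (PySem.Dict.empty, 0)
  st.1.items

-- ===== PORT B =====
-- per-document pass of Source B: sort, then count runs of length exactly 1 with (prev, runlen, c) state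
def pvDocCount (ws : List String) : Int :=
  let s := PySem.List.sorted ws (fun x => x) false
  let st := s.foldl (fun (st : Option String × Int × Int) w =>
      if st.1 == none || some w != st.1 then (some w, 1, st.2.2 + (if st.2.1 == 1 then 1 else 0))
      else (some w, st.2.1 + 1, st.2.2))
    (none, 0, 0)
  st.2.2 + (if st.2.1 == 1 then 1 else 0)

def build_doc_dictionary_alt (data : List (String × List String)) : List (String × Int) :=
  (data.foldl (fun (res : PySem.Dict String Int) (p : String × List String) =>
      res.insert p.1 (pvDocCount p.2))
    PySem.Dict.empty).items

-- ===== PRECONDITION & SPEC =====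
def Spec_build_doc_dictionary (data : List (String × List String)) (out : List (String × Int)) : Prop := out = build_doc_dictionary_alt data
instance (data : List (String × List String)) (out : List (String × Int)) : Decidable (Spec_build_doc_dictionary data out) := by unfold Spec_build_doc_dictionary; infer_instance

-- ===== CLAIM (what is proved, stated in full; the proofs are below) =====
def Claim_equal_build_doc_dictionary : Prop := ∀ (data : List (String × List String)), Dom_build_doc_dictionary data → Spec_build_doc_dictionary data (build_doc_dictionary data)

-- ===== LEMMAS AND PROOFS =====

-- number of elements of l occurring exactly once in l
def countSingle (l : List String) : Nat := l.countP (fun w => l.count w == 1)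

-- result of B's per-document loop from an arbitrary starting state
def pvRun (st : Option String × Int × Int) (t : List String) : Int :=
  let r := t.foldl (fun (st : Option String × Int × Int) w =>
      if st.1 == none || some w != st.1 then (some w, 1, st.2.2 + (if st.2.1 == 1 then 1 else 0))
      else (some w, st.2.1 + 1, st.2.2)) st
  r.2.2 + (if r.2.1 == 1 then 1 else 0)

-- a conditional-increment fold is the start plus countP
theorem foldl_if_countP {α : Type} (p : α → Bool) (l : List α) (s0 : Int) :
    l.foldl (fun s x => if p x then s + 1 else s) s0 = s0 + l.countP p := by
  induction l generalizing s0 with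
  | nil => simp
  | cons x xs ih =>
    simp only [List.foldl_cons, List.countP_cons, ih]
    by_cases h : p x = true <;> simp [h] <;> try ring

-- peeling the head off countSingle (no sortedness needed)
theorem countSingle_cons (y : String) (t : List String) :
    countSingle (y :: t) =
      (if t.count y = 0 then 1 else 0) + countSingle (t.filter (· ≠ y)) := by
  unfold countSingle
  rw [List.countP_cons]
  have h1 : t.countP (fun w => (y :: t).count w == 1)
      = t.countP (fun w => ((y :: t).count w == 1) && (w ≠ y)) := by
    apply List.countP_congr
    intro w hw
    by_cases hwy : w = y
    · subst hwy
      have : (w :: t).count w = t.count w + 1 := by simp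
      have hc : 1 ≤ t.count w := List.one_le_count_iff.mpr hw
      simp [this]
      omega
    · simp [hwy]
  have h2 : t.countP (fun w => ((y :: t).count w == 1) && (w ≠ y))
      = (t.filter (· ≠ y)).countP (fun w => (y :: t).count w == 1) := by
    rw [List.countP_filter]
  have h3 : (t.filter (· ≠ y)).countP (fun w => (y :: t).count w == 1)
      = (t.filter (· ≠ y)).countP (fun w => (t.filter (· ≠ y)).count w == 1) := by
    apply List.countP_congr
    intro w hw
    have hwy : w ≠ y := by
      have := List.of_mem_filter hw
      simpa using this
    have hcy : (y :: t).count w = t.count w := by simp [Ne.symm hwy]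
    have hcf : (t.filter (· ≠ y)).count w = t.count w := by
      rw [List.count_filter]
      simp [hwy]
    rw [hcy, hcf]
  rw [h1, h2, h3, List.count_cons_self]
  by_cases h : t.count y = 0
  · simp [h, Nat.add_comm]
  · have hne : (t.count y + 1 == 1) = false := by simp; omega
    simp [h, hne]

-- loop invariant for B's pass over a sorted tail: x is the current run's value (length r so far)
theorem pvRun_invariant (t : List String) : ∀ (x : String) (r c : Int),
    t.Pairwise (· ≤ ·) → (∀ w ∈ t, x ≤ w) →
    pvRun (some x, r, c) t
      = c + (if r + (t.count x : Int) = 1 then 1 else 0) + (countSingle (t.filter (· ≠ x)) : Int) := by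
  induction t with
  | nil =>
    intro x r c _ _
    simp [pvRun, countSingle]
  | cons y t' ih =>
    intro x r c hpw hle
    have hpw' : t'.Pairwise (· ≤ ·) := hpw.tail
    have hyle : ∀ w ∈ t', y ≤ w := fun w hw => (List.pairwise_cons.mp hpw).1 w hw
    by_cases hxy : y = x
    · subst hxy
      have hstep : pvRun (some y, r, c) (y :: t') = pvRun (some y, r + 1, c) t' := by
        simp [pvRun]
      rw [hstep, ih y (r + 1) c hpw' hyle]
      have hcnt : ((y :: t').count y : Int) = (t'.count y : Int) + 1 := by
        simp
      have hfil : (y :: t').filter (· ≠ y) = t'.filter (· ≠ y) := by simp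
      rw [hcnt, hfil]
      have : r + 1 + (t'.count y : Int) = r + ((t'.count y : Int) + 1) := by ring
      rw [this]
    · have hxy' : x ≠ y := fun h => hxy h.symm
      have hxlty : x < y := lt_of_le_of_ne (hle y (List.mem_cons_self)) hxy'
      have hstep : pvRun (some x, r, c) (y :: t')
          = pvRun (some y, 1, c + (if r = 1 then 1 else 0)) t' := by
        simp [pvRun, hxy]
      rw [hstep, ih y 1 (c + (if r = 1 then 1 else 0)) hpw' hyle]
      have hxnot : x ∉ (y :: t') := by
        intro hmem
        rcases List.mem_cons.mp hmem with h | h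
        · exact hxy' h
        · exact absurd (hyle x h) (not_le.mpr hxlty)
      have hcnt0 : (y :: t').count x = 0 := List.count_eq_zero.mpr hxnot
      have hfil : (y :: t').filter (· ≠ x) = y :: t' := by
        apply List.filter_eq_self.mpr
        intro w hw
        rcases List.mem_cons.mp hw with h | h
        · subst h; simp [Ne.symm hxy']
        · have : x < w := lt_of_lt_of_le hxlty (hyle w h)
          simp [Ne.symm (ne_of_lt this)]
      rw [hcnt0, hfil, countSingle_cons]
      push_cast
      by_cases hy0 : t'.count y = 0
      · simp [hy0]; ring
      · have h1 : ¬ ((1 : Int) + (t'.count y : Int) = 1) := by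
          have : 1 ≤ t'.count y := Nat.one_le_iff_ne_zero.mpr hy0
          omega
        simp [hy0, h1]

-- B's per-document pass over any sorted list counts its singletons
theorem pvRun_sorted (s : List String) (hs : s.Pairwise (· ≤ ·)) :
    pvRun (none, 0, 0) s = (countSingle s : Int) := by
  cases s with
  | nil => simp [pvRun, countSingle]
  | cons x t =>
    have hstep : pvRun ((none : Option String), 0, 0) (x :: t) = pvRun (some x, 1, 0) t := by
      simp [pvRun]
    have hle : ∀ w ∈ t, x ≤ w := fun w hw => (List.pairwise_cons.mp hs).1 w hw
    rw [hstep, pvRun_invariant t x 1 0 hs.tail hle, countSingle_cons]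
    push_cast
    by_cases h : t.count x = 0
    · simp [h]
    · have h1 : ¬ ((1 : Int) + (t.count x : Int) = 1) := by
        have : 1 ≤ t.count x := Nat.one_le_iff_ne_zero.mpr h
        omega
      simp [h, h1]

-- per-document values of the two ports coincide
theorem doc_value_eq (ws : List String) :
    ws.foldl (fun c w => if ws.count w == 1 then c + 1 else c) (0 : Int) = pvDocCount ws := by
  have hB : pvDocCount ws = pvRun (none, 0, 0) (PySem.List.sorted ws (fun x => x) false) := rfl
  have hperm : (PySem.List.sorted ws (fun x => x) false).Perm ws := PySem.List.sorted_perm ws _ _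
  have hpw : (PySem.List.sorted ws (fun x => x) false).Pairwise (· ≤ ·) := by
    have := PySem.List.sorted_pairwise (xs := ws) (key := fun x => x)
    simpa using this
  rw [hB, pvRun_sorted _ hpw, foldl_if_countP]
  have h1 : countSingle (PySem.List.sorted ws (fun x => x) false)
      = (PySem.List.sorted ws (fun x => x) false).countP (fun w => ws.count w == 1) := by
    unfold countSingle
    apply List.countP_congr
    intro w _
    rw [hperm.count_eq]
  rw [h1, hperm.countP_eq]
  simp

-- the two outer folds agree, given equal accumulated dicts and A's reset-to-zero counter
theorem fold_eq (data : List (String × List String)) :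
    ∀ (resA resB : PySem.Dict String Int), resA = resB →
      (data.foldl (fun (st : PySem.Dict String Int × Int) (p : String × List String) =>
        let cu := p.2.foldl (fun c w => if p.2.count w == 1 then c + 1 else c) st.2
        (st.1.insert p.1 cu, 0)) (resA, 0)).1
      = data.foldl (fun (res : PySem.Dict String Int) (p : String × List String) =>
        res.insert p.1 (pvDocCount p.2)) resB := by
  induction data with
  | nil => intro a b h; simpa using h
  | cons p rest ih =>
    intro a b h
    simp only [List.foldl_cons]
    apply ih
    rw [h, doc_value_eq]

-- ===== VERDICT (by name: the statement is the Claim_ definition above) =====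
theorem build_doc_dictionary_spec : Claim_equal_build_doc_dictionary := by
  intro data _
  unfold Spec_build_doc_dictionary build_doc_dictionary build_doc_dictionary_alt
  simp only
  congr 1
  exact fold_eq data _ _ rfl
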